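-- pv_equiv track=rewrite | github.com/nadakhelif/Macadem_assessment | algorithm.py | transformation_time
-- ===== SOURCE A (Python) =====
-- def transformation_time(char,s):
--     vowels = set('AEIOU')
--     time = 0
--     is_char_vowel = char in vowels
--     for c in s:
--         is_c_vowel = c in vowels
--         if char == c :
--             time += 0
--         elif is_c_vowel and not is_char_vowel:
--             time += 1
--         elif not is_c_vowel and is_char_vowel :
--             time += 1
--         elif is_c_vowel and is_char_vowel:
--             time += 2
--         elif not is_c_vowel and not is_char_vowel:
--             time += 2
--     return time
-- ===== SOURCE B (Python) =====
-- def transformation_time(char, s):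
--     vowels = set('AEIOU')
--     n = len(s)
--     v = sum(1 for c in s if c in vowels)
--     eq = sum(1 for c in s if char == c)
--     if char in vowels:
--         return 2 * (v - eq) + (n - v)
--     return 2 * ((n - v) - eq) + v
-- ===== Notes on version B (the rewrite author's own statement) =====
-- stated objective: simpler
-- what changed: Replaces the five-way per-character if/elif accumulation loop with two counts (vowels in s, characters equal to char) combined by a closed-form arithmetic formula chosen by whether char is a vowel.
import Mathlib
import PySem

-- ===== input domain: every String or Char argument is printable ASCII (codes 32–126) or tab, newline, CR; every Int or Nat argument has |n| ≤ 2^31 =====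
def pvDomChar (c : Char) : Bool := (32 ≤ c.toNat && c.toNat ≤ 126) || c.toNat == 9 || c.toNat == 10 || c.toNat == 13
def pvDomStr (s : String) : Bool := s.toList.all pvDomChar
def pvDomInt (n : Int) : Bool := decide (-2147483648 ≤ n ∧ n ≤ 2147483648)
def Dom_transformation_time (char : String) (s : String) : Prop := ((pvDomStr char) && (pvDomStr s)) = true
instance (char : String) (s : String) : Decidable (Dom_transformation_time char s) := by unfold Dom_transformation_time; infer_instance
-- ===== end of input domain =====

-- ===== PORT A =====
-- header: B replaces the per-character five-way branch loop with two counts plus a closed-form formula (objective: simpler); same return value everywhere.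
def pvVowelStrs : List String := PySem.Set.ofList ("AEIOU".toList.map (fun c => String.ofList [c]))

def transformation_time (char : String) (s : String) : Int :=
  let is_char_vowel := pvVowelStrs.contains char
  s.toList.foldl (fun time c =>
    let is_c_vowel := pvVowelStrs.contains (String.ofList [c])
    if char == String.ofList [c] then time + 0
    else if is_c_vowel && !is_char_vowel then time + 1
    else if !is_c_vowel && is_char_vowel then time + 1
    else if is_c_vowel && is_char_vowel then time + 2
    else if !is_c_vowel && !is_char_vowel then time + 2
    else time) 0

-- ===== PORT B =====
def transformation_time_alt (char : String) (s : String) : Int :=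
  let l := s.toList
  let n : Int := l.length
  let v : Int := l.countP (fun c => pvVowelStrs.contains (String.ofList [c]))
  let eq : Int := l.countP (fun c => char == String.ofList [c])
  if pvVowelStrs.contains char then 2 * (v - eq) + (n - v)
  else 2 * ((n - v) - eq) + v

-- ===== PRECONDITION & SPEC =====
def Spec_transformation_time (char : String) (s : String) (out : Int) : Prop := out = transformation_time_alt char s
instance (char : String) (s : String) (out : Int) : Decidable (Spec_transformation_time char s out) := by unfold Spec_transformation_time; infer_instance

-- ===== CLAIM (what is proved, stated in full; the proofs are below) =====
def Claim_equal_transformation_time : Prop := ∀ (char : String) (s : String), Dom_transformation_time char s → Spec_transformation_time char s (transformation_time char s)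

-- ===== LEMMAS AND PROOFS =====

-- if char equals the one-char string of c, both strings have the same vowel status
lemma pv_mem_congr (char : String) (c : Char) (h : (char == String.ofList [c]) = true) :
    pvVowelStrs.contains char = pvVowelStrs.contains (String.ofList [c]) := by
  rw [beq_iff_eq] at h; rw [h]

-- loop invariant: the fold equals the accumulator plus B's closed form over the remaining list
lemma pv_fold_eq (char : String) (l : List Char) (t : Int) :
    l.foldl (fun time c =>
      let is_c_vowel := pvVowelStrs.contains (String.ofList [c])
      if char == String.ofList [c] then time + 0
      else if is_c_vowel && !(pvVowelStrs.contains char) then time + 1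
      else if !is_c_vowel && (pvVowelStrs.contains char) then time + 1
      else if is_c_vowel && (pvVowelStrs.contains char) then time + 2
      else if !is_c_vowel && !(pvVowelStrs.contains char) then time + 2
      else time) t
    = t + (let n : Int := l.length
           let v : Int := l.countP (fun c => pvVowelStrs.contains (String.ofList [c]))
           let eq : Int := l.countP (fun c => char == String.ofList [c])
           if pvVowelStrs.contains char then 2 * (v - eq) + (n - v)
           else 2 * ((n - v) - eq) + v) := by
  induction l generalizing t with
  | nil => simp
  | cons c l ih =>
    simp only [List.foldl_cons, ih, List.countP_cons, List.length_cons]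
    by_cases hc : (char == String.ofList [c]) = true
    · cases hv : pvVowelStrs.contains (String.ofList [c]) with
      | false =>
        have hcv : pvVowelStrs.contains char = false := (pv_mem_congr char c hc).trans hv
        have hm : ¬ char ∈ pvVowelStrs := by simpa using hcv
        simp [hc, hm] <;> (push_cast; ring)
      | true =>
        have hcv : pvVowelStrs.contains char = true := (pv_mem_congr char c hc).trans hv
        have hm : char ∈ pvVowelStrs := by simpa using hcv
        simp [hc, hm]
    · rw [Bool.not_eq_true] at hc
      cases hcv : pvVowelStrs.contains char <;> cases hv : pvVowelStrs.contains (String.ofList [c]) <;>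
        first
        | (have hm : ¬ char ∈ pvVowelStrs := by simpa using hcv
           simp [hc, hm, hv] <;> (push_cast; ring))
        | (have hm : char ∈ pvVowelStrs := by simpa using hcv
           simp [hc, hm, hv] <;> (push_cast; ring))

-- ===== VERDICT (by name: the statement is the Claim_ definition above) =====
theorem transformation_time_spec : Claim_equal_transformation_time := by
  intro char s _
  show transformation_time char s = transformation_time_alt char s
  unfold transformation_time transformation_time_alt
  simpa using pv_fold_eq char s.toList 0
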